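-- pv_equiv track=rewrite | github.com/taras-svystun/Contest3 | Python_code/E.py | z_to_prefix
-- ===== SOURCE A (Python) =====
-- def z_to_prefix(array: list, length: int) -> list:
--     i = 1
--     converted = [0 for _ in range(length)]
--     while i < length:
--         if array[i]:
--             j = array[i] - 1
--             while j >= 0 and not converted[i + j]:
--                 converted[i + j] = j + 1
--                 j -= 1
--         i += 1
--     return converted
-- ===== SOURCE B (Python) =====
-- def z_to_prefix(array: list, length: int) -> list:
--     p = [0] * length
--     # pass 1: record each Z-block's full border at its right endpoint
--     for i in range(1, length):
--         z = array[i]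
--         if z > 0:
--             end = i + z - 1
--             p[end] = max(p[end], z)
--     # pass 2: propagate borders leftward (pi[k-1] >= pi[k] - 1)
--     for k in range(length - 1, 0, -1):
--         p[k - 1] = max(p[k - 1], p[k] - 1)
--     return p
-- ===== Notes on version B (the rewrite author's own statement) =====
-- stated objective: alternative
-- what changed: A's nested fill-with-break (for each Z-block, write border lengths downward until hitting an already-filled cell) is replaced by two independent linear passes: mark each block's full border at its right endpoint with max, then propagate borders leftward via pi[k-1] = max(pi[k-1], pi[k]-1).
-- outside the precondition, e.g. on z_to_prefix([0, 5, 0], 3): A raises IndexError, B raises IndexError; on z_to_prefix([0], 2): A raises IndexError, B raises IndexError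
import Mathlib
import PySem

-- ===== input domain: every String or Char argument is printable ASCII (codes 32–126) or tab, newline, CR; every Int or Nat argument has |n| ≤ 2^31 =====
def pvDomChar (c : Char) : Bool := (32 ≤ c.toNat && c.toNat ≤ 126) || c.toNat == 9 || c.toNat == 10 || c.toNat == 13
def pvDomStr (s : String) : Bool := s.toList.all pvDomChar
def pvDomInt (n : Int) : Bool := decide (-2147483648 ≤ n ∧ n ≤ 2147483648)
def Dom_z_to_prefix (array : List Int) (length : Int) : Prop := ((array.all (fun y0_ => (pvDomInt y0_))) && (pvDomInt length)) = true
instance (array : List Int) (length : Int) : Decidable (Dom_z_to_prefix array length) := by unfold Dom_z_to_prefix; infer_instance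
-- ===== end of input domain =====

-- B replaces A's nested fill-with-break by two independent linear passes (endpoint marking with max, then backward border propagation); same cost, different algorithm.


-- ===== PORT A =====
-- inner 'while j >= 0 and not converted[i + j]' loop; fuel = array[i].toNat bounds its iterations.
-- indices i + j are ≥ 1 whenever the loop body runs, so getD/toNat indexing is exact on Pre_.
def zpInnerA (conv : List Int) (i j : Int) (fuel : Nat) : List Int :=
  match fuel with
  | 0 => conv
  | fuel + 1 =>
    if 0 ≤ j ∧ conv.getD (i + j).toNat 0 = 0 then
      zpInnerA (conv.set (i + j).toNat (j + 1)) i (j - 1) fuel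
    else conv

def z_to_prefix (array : List Int) (length : Int) : List Int :=
  (PySem.List.pyRange 1 length 1).foldl
    (fun conv i =>
      let zi := PySem.List.pyGetD array i 0
      if zi ≠ 0 then zpInnerA conv i (zi - 1) zi.toNat else conv)
    (List.replicate length.toNat 0)

-- ===== PORT B =====
def z_to_prefix_alt (array : List Int) (length : Int) : List Int :=
  let p1 := (PySem.List.pyRange 1 length 1).foldl
    (fun p i =>
      let z := PySem.List.pyGetD array i 0
      if 0 < z then
        p.set (i + z - 1).toNat (max (p.getD (i + z - 1).toNat 0) z)
      else p)
    (List.replicate length.toNat 0)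
  (PySem.List.pyRange (length - 1) 0 (-1)).foldl
    (fun p k => p.set (k - 1).toNat (max (p.getD (k - 1).toNat 0) (p.getD k.toNat 0 - 1)))
    p1

-- ===== PRECONDITION & SPEC =====
-- Pre_: exactly the inputs on which Python A returns (no IndexError): every index 1..length-1
-- is inside array, and each positive Z-value stays inside the output list.
def Pre_z_to_prefix (array : List Int) (length : Int) : Prop :=
  (2 ≤ length → length ≤ (array.length : Int)) ∧
  ∀ i : Nat, i < length.toNat → 1 ≤ i → 1 ≤ array.getD i 0 → (i : Int) + array.getD i 0 ≤ length

instance (array : List Int) (length : Int) : Decidable (Pre_z_to_prefix array length) := by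
  unfold Pre_z_to_prefix; infer_instance

def pvWitness_z_to_prefix : List Int × Int := ([0, 3, 0, 1, 0], 5)

def Spec_z_to_prefix (array : List Int) (length : Int) (out : List Int) : Prop := out = z_to_prefix_alt array length
instance (array : List Int) (length : Int) (out : List Int) : Decidable (Spec_z_to_prefix array length out) := by unfold Spec_z_to_prefix; infer_instance

-- ===== CLAIM (what is proved, stated in full; the proofs are below) =====
def Claim_equal_z_to_prefix : Prop := ∀ (array : List Int) (length : Int), Dom_z_to_prefix array length → Pre_z_to_prefix array length → Spec_z_to_prefix array length (z_to_prefix array length)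

-- ===== LEMMAS AND PROOFS =====

-- value of the Z-array at nat index i (0 when out of range; Pre_ rules such i out of play)
def zv (a : List Int) (i : Nat) : Int := a.getD i 0

-- block i covers position q
def cov (a : List Int) (i q : Nat) : Bool :=
  decide (1 ≤ i ∧ 1 ≤ zv a i ∧ i ≤ q ∧ (q : Int) < (i : Int) + zv a i)

-- the prefix-function value at q contributed by blocks i < m
def F (a : List Int) (m q : Nat) : Int :=
  (List.range m).foldl (fun acc i => if cov a i q then max acc ((q : Int) - i + 1) else acc) 0

-- block i has right endpoint e
def covE (a : List Int) (i e : Nat) : Bool :=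
  decide (1 ≤ i ∧ 1 ≤ zv a i ∧ (i : Int) + zv a i = (e : Int) + 1)

-- pass-1 mark at endpoint e from blocks i < m
def G (a : List Int) (m e : Nat) : Int :=
  (List.range m).foldl (fun acc i => if covE a i e then max acc (zv a i) else acc) 0

-- value after B's backward pass: max over endpoints e ≥ q of (mark e - (e - q))
def Hd (a : List Int) (n q : Nat) : Int :=
  if h : q + 1 < n then max (G a n q) (Hd a n (q + 1) - 1) else G a n q
termination_by n - q
decreasing_by omega


-- q-th entry of a set/replicate list, with default 0
theorem pvGetD_set (l : List Int) (k q : Nat) (v : Int) (hk : k < l.length) :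
    (l.set k v).getD q 0 = if q = k then v else l.getD q 0 := by
  rcases eq_or_ne q k with h | h
  · subst h; simp [List.getD_eq_getElem?_getD, hk]
  · simp [List.getD_eq_getElem?_getD, Ne.symm h, h]

theorem pvGetD_replicate (n q : Nat) : (List.replicate n (0:Int)).getD q 0 = 0 := by
  simp [List.getD_eq_getElem?_getD, List.getElem?_replicate]
  split <;> simp

-- ---- facts about F ----
theorem F_succ (a : List Int) (m q : Nat) :
    F a (m+1) q = if cov a m q then max (F a m q) ((q : Int) - m + 1) else F a m q := by
  simp [F, List.range_succ]

theorem F_nonneg (a : List Int) (m q : Nat) : 0 ≤ F a m q := by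
  induction m with
  | zero => simp [F]
  | succ m ih =>
    rw [F_succ]; split
    · exact le_trans ih (le_max_left _ _)
    · exact ih

theorem F_ge (a : List Int) (m q i : Nat) (hi : i < m) (hc : cov a i q = true) :
    (q : Int) - i + 1 ≤ F a m q := by
  induction m with
  | zero => omega
  | succ m ih =>
    rw [F_succ]
    rcases Nat.lt_succ_iff_lt_or_eq.mp hi with h | h
    · split
      · exact le_trans (ih h) (le_max_left _ _)
      · exact ih h
    · subst h; simp [hc]

theorem F_le (a : List Int) (m q : Nat) (B : Int) (h0 : 0 ≤ B)
    (h : ∀ i, i < m → cov a i q = true → (q : Int) - i + 1 ≤ B) : F a m q ≤ B := by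
  induction m with
  | zero => simpa [F] using h0
  | succ m ih =>
    rw [F_succ]; split
    · rename_i hc
      exact max_le (ih (fun i hi hci => h i (Nat.lt_succ_of_lt hi) hci))
        (h m (Nat.lt_succ_self m) hc)
    · exact ih (fun i hi hci => h i (Nat.lt_succ_of_lt hi) hci)

theorem F_exists_of_ne (a : List Int) (m q : Nat) (h : F a m q ≠ 0) :
    ∃ i, i < m ∧ cov a i q = true := by
  induction m with
  | zero => simp [F] at h
  | succ m ih =>
    rw [F_succ] at h
    by_cases hc : cov a m q = true
    · exact ⟨m, Nat.lt_succ_self m, hc⟩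
    · simp [hc] at h
      obtain ⟨i, hi, hci⟩ := ih h
      exact ⟨i, Nat.lt_succ_of_lt hi, hci⟩

theorem cov_false_of_lt (a : List Int) (i q : Nat) (h : q < i) : cov a i q = false := by
  simp [cov]; omega

theorem cov_false_of_zv (a : List Int) (i q : Nat) (h : zv a i ≤ 0) : cov a i q = false := by
  simp [cov]; intro _ h1; omega

theorem cov_false_of_ge (a : List Int) (i q : Nat) (h : (i : Int) + zv a i ≤ (q : Int)) :
    cov a i q = false := by
  simp [cov]; intro _ _ _; omega

theorem F_succ_of_not_cov (a : List Int) (m q : Nat) (h : cov a m q = false) :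
    F a (m+1) q = F a m q := by rw [F_succ, h]; simp

-- ---- facts about G ----
theorem G_succ (a : List Int) (m e : Nat) :
    G a (m+1) e = if covE a m e then max (G a m e) (zv a m) else G a m e := by
  simp [G, List.range_succ]

theorem G_nonneg (a : List Int) (m e : Nat) : 0 ≤ G a m e := by
  induction m with
  | zero => simp [G]
  | succ m ih =>
    rw [G_succ]; split
    · exact le_trans ih (le_max_left _ _)
    · exact ih

theorem G_ge (a : List Int) (m e i : Nat) (hi : i < m) (hc : covE a i e = true) :
    zv a i ≤ G a m e := by
  induction m with
  | zero => omega
  | succ m ih =>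
    rw [G_succ]
    rcases Nat.lt_succ_iff_lt_or_eq.mp hi with h | h
    · split
      · exact le_trans (ih h) (le_max_left _ _)
      · exact ih h
    · subst h; simp [hc]

theorem G_le (a : List Int) (m e : Nat) (B : Int) (h0 : 0 ≤ B)
    (h : ∀ i, i < m → covE a i e = true → zv a i ≤ B) : G a m e ≤ B := by
  induction m with
  | zero => simpa [G] using h0
  | succ m ih =>
    rw [G_succ]; split
    · rename_i hc
      exact max_le (ih (fun i hi hci => h i (Nat.lt_succ_of_lt hi) hci))
        (h m (Nat.lt_succ_self m) hc)
    · exact ih (fun i hi hci => h i (Nat.lt_succ_of_lt hi) hci)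

-- ---- the precondition, nat-indexed ----
def PreN (a : List Int) (n : Nat) : Prop :=
  ∀ i : Nat, i < n → 1 ≤ i → 1 ≤ zv a i → (i : Int) + zv a i ≤ (n : Int)

-- ---- port A characterised ----
def stepA (array : List Int) (conv : List Int) (i : Int) : List Int :=
  let zi := PySem.List.pyGetD array i 0
  if zi ≠ 0 then zpInnerA conv i (zi - 1) zi.toNat else conv

theorem z_to_prefix_eq (array : List Int) (length : Int) :
    z_to_prefix array length =
      (PySem.List.pyRange 1 length 1).foldl (stepA array) (List.replicate length.toNat 0) := rfl

theorem zpInnerA_neg (c : List Int) (i j : Int) (fuel : Nat) (h : j < 0) :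
    zpInnerA c i j fuel = c := by
  cases fuel with
  | zero => rfl
  | succ f => simp [zpInnerA]; intro h'; omega

theorem innerA_inv (a : List Int) (n m : Nat) (hm : 1 ≤ m) (hz : 1 ≤ zv a m)
    (hmz : (m : Int) + zv a m ≤ (n : Int)) :
    ∀ (t fuel : Nat), (t : Int) ≤ zv a m → t ≤ fuel → ∀ c : List Int, c.length = n →
    (∀ q, q < m + t → c.getD q 0 = F a m q) →
    (∀ q, q < n → m + t ≤ q → c.getD q 0 = F a (m+1) q) →
    (zpInnerA c (m : Int) ((t : Int) - 1) fuel).length = n ∧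
    ∀ q, q < n → (zpInnerA c (m : Int) ((t : Int) - 1) fuel).getD q 0 = F a (m+1) q := by
  intro t
  induction t with
  | zero =>
    intro fuel _ _ c hlen h1 h2
    rw [zpInnerA_neg c _ _ _ (by norm_num)]
    refine ⟨hlen, fun q hq => ?_⟩
    rcases Nat.lt_or_ge q m with hlt | hge
    · rw [h1 q (by omega), F_succ_of_not_cov a m q (cov_false_of_lt a m q hlt)]
    · exact h2 q hq (by omega)
  | succ t ih =>
    intro fuel hts hf c hlen h1 h2
    have hqn : m + t < n := by omega
    obtain ⟨f, rfl⟩ : ∃ f, fuel = f + 1 := ⟨fuel - 1, by omega⟩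
    have hcast : ((t + 1 : Nat) : Int) - 1 = (t : Int) := by push_cast; ring
    have hidx : ((m : Int) + ((t:Nat) : Int)).toNat = m + t := by omega
    rw [hcast]
    by_cases h0 : c.getD (m + t) 0 = 0
    · have hstep : zpInnerA c (m : Int) (t : Int) (f + 1) =
          zpInnerA (c.set (m + t) ((t : Int) + 1)) (m : Int) ((t : Int) - 1) f := by
        simp only [zpInnerA, hidx]
        rw [if_pos ⟨by positivity, h0⟩]
      rw [hstep]
      have hFm : F a m (m + t) = 0 := by rw [← h1 (m + t) (by omega)]; exact h0
      have hFm1 : F a (m+1) (m + t) = (t : Int) + 1 := by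
        rw [F_succ]
        have hc : cov a m (m + t) = true := by
          simp [cov]
          refine ⟨hm, hz, by omega⟩
        rw [if_pos hc, hFm]
        omega
      refine ih f (by omega) (by omega) _ (by simpa using hlen) ?_ ?_
      · intro q hq
        rw [pvGetD_set _ _ _ _ (by omega), if_neg (by omega)]
        exact h1 q (by omega)
      · intro q hqn' hge
        rcases Nat.eq_or_lt_of_le hge with rfl | hgt
        · rw [pvGetD_set _ _ _ _ (by omega), if_pos rfl, hFm1]
        · rw [pvGetD_set _ _ _ _ (by omega), if_neg (by omega)]
          exact h2 q hqn' (by omega)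
    · have hstep : zpInnerA c (m : Int) (t : Int) (f + 1) = c := by
        simp only [zpInnerA, hidx]
        rw [if_neg (by rintro ⟨-, h⟩; exact h0 h)]
      rw [hstep]
      refine ⟨hlen, fun q hq => ?_⟩
      rcases Nat.lt_or_ge q (m + t + 1) with hlt | hge
      · -- q ≤ m + t : old value is already the full answer
        rw [h1 q hlt]
        have hFne : F a m (m + t) ≠ 0 := by rw [← h1 (m + t) (by omega)]; exact h0
        obtain ⟨i, him, hci⟩ := F_exists_of_ne a m (m + t) hFne
        have hci' := of_decide_eq_true hci
        obtain ⟨hi1, hiz, hiq, hicov⟩ := hci'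
        by_cases hcq : cov a m q = true
        · have hm_le_q : m ≤ q := (of_decide_eq_true hcq).2.2.1
          have hcovq : cov a i q = true := by
            simp [cov]
            exact ⟨hi1, hiz, by omega, by push_cast at hicov ⊢; omega⟩
          have := F_ge a m q i him hcovq
          rw [F_succ, if_pos hcq]
          have : (q : Int) - m + 1 ≤ F a m q := by
            have hile : (i : Int) ≤ (m : Int) := by exact_mod_cast Nat.le_of_lt him
            omega
          omega
        · rw [F_succ_of_not_cov a m q (by simpa using hcq)]
      · exact h2 q hq hge

theorem outerA_inv (a : List Int) (n : Nat) (hPre : PreN a n) :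
    ∀ m : Nat, m ≤ n →
    ((PySem.List.pyRange 1 (m : Int) 1).foldl (stepA a) (List.replicate n 0)).length = n ∧
    ∀ q, q < n →
      ((PySem.List.pyRange 1 (m : Int) 1).foldl (stepA a) (List.replicate n 0)).getD q 0 = F a m q := by
  intro m
  induction m with
  | zero =>
    intro _
    rw [PySem.List.pyRange_one_eq_nil (by norm_num)]
    exact ⟨by simp, fun q _ => by simp only [List.foldl_nil]; rw [pvGetD_replicate]; simp [F]⟩
  | succ m ih =>
    intro hmn
    have ihm := ih (by omega)
    rcases Nat.eq_zero_or_pos m with rfl | hm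
    · rw [PySem.List.pyRange_one_eq_nil (by norm_num)]
      refine ⟨by simp, fun q hq => ?_⟩
      simp only [List.foldl_nil]
      rw [pvGetD_replicate, F_succ_of_not_cov a 0 q (by simp [cov])]
      simp [F]
    · have hsplit : PySem.List.pyRange 1 ((m : Int) + 1) 1 =
          PySem.List.pyRange 1 (m : Int) 1 ++ [(m : Int)] :=
        PySem.List.pyRange_one_succ_right (by exact_mod_cast hm)
      have hcast : (((m + 1 : Nat)) : Int) = (m : Int) + 1 := by push_cast; ring
      rw [hcast, hsplit, List.foldl_append]
      set c := (PySem.List.pyRange 1 (m : Int) 1).foldl (stepA a) (List.replicate n 0) with hc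
      simp only [List.foldl]
      have hget : PySem.List.pyGetD a (m : Int) 0 = zv a m := PySem.List.pyGetD_natCast a m 0
      rcases lt_trichotomy (zv a m) 0 with hneg | hzero | hpos
      · have : stepA a c (m : Int) = c := by
          simp only [stepA, hget]
          rw [if_pos (by omega)]
          have : (zv a m).toNat = 0 := by omega
          rw [this]; rfl
        rw [this]
        refine ⟨ihm.1, fun q hq => ?_⟩
        rw [ihm.2 q hq, F_succ_of_not_cov a m q (cov_false_of_zv a m q (by omega))]
      · have : stepA a c (m : Int) = c := by
          simp only [stepA, hget, hzero]
          simp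
        rw [this]
        refine ⟨ihm.1, fun q hq => ?_⟩
        rw [ihm.2 q hq, F_succ_of_not_cov a m q (cov_false_of_zv a m q (by omega))]
      · have hz1 : 1 ≤ zv a m := hpos
        have hmz : (m : Int) + zv a m ≤ (n : Int) := hPre m (by omega) hm hz1
        have hstep : stepA a c (m : Int) =
            zpInnerA c (m : Int) (zv a m - 1) (zv a m).toNat := by
          simp only [stepA, hget]
          rw [if_pos (by omega)]
        rw [hstep]
        have hcast2 : (((zv a m).toNat : Nat) : Int) - 1 = zv a m - 1 := by omega
        rw [← hcast2]
        exact innerA_inv a n m hm hz1 hmz (zv a m).toNat (zv a m).toNat (by omega) le_rfl c ihm.1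
          (fun q hq => ihm.2 q (by omega))
          (fun q hq hge => by
            rw [ihm.2 q hq, F_succ_of_not_cov a m q (cov_false_of_ge a m q (by omega))])

-- ---- port B characterised ----
def stepB1 (array : List Int) (p : List Int) (i : Int) : List Int :=
  let z := PySem.List.pyGetD array i 0
  if 0 < z then
    p.set (i + z - 1).toNat (max (p.getD (i + z - 1).toNat 0) z)
  else p

def stepB2 (p : List Int) (k : Int) : List Int :=
  p.set (k - 1).toNat (max (p.getD (k - 1).toNat 0) (p.getD k.toNat 0 - 1))

theorem z_to_prefix_alt_eq (array : List Int) (length : Int) :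
    z_to_prefix_alt array length =
      (PySem.List.pyRange (length - 1) 0 (-1)).foldl stepB2
        ((PySem.List.pyRange 1 length 1).foldl (stepB1 array)
          (List.replicate length.toNat 0)) := rfl

theorem covE_iff (a : List Int) (i e : Nat) :
    covE a i e = true ↔ 1 ≤ i ∧ 1 ≤ zv a i ∧ (i : Int) + zv a i = (e : Int) + 1 := by
  simp [covE]

theorem G_succ_of_not (a : List Int) (m e : Nat) (h : covE a m e = false) :
    G a (m+1) e = G a m e := by rw [G_succ, h]; simp

theorem pass1_inv (a : List Int) (n : Nat) (hPre : PreN a n) :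
    ∀ m : Nat, m ≤ n →
    ((PySem.List.pyRange 1 (m : Int) 1).foldl (stepB1 a) (List.replicate n 0)).length = n ∧
    ∀ e, e < n →
      ((PySem.List.pyRange 1 (m : Int) 1).foldl (stepB1 a) (List.replicate n 0)).getD e 0 = G a m e := by
  intro m
  induction m with
  | zero =>
    intro _
    rw [PySem.List.pyRange_one_eq_nil (by norm_num)]
    exact ⟨by simp, fun e _ => by simp only [List.foldl_nil]; rw [pvGetD_replicate]; simp [G]⟩
  | succ m ih =>
    intro hmn
    have ihm := ih (by omega)
    rcases Nat.eq_zero_or_pos m with rfl | hm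
    · rw [PySem.List.pyRange_one_eq_nil (by norm_num)]
      refine ⟨by simp, fun e he => ?_⟩
      simp only [List.foldl_nil]
      rw [pvGetD_replicate, G_succ_of_not a 0 e (by simp [covE])]
      simp [G]
    · have hsplit : PySem.List.pyRange 1 ((m : Int) + 1) 1 =
          PySem.List.pyRange 1 (m : Int) 1 ++ [(m : Int)] :=
        PySem.List.pyRange_one_succ_right (by exact_mod_cast hm)
      have hcast : (((m + 1 : Nat)) : Int) = (m : Int) + 1 := by push_cast; ring
      rw [hcast, hsplit, List.foldl_append]
      set p := (PySem.List.pyRange 1 (m : Int) 1).foldl (stepB1 a) (List.replicate n 0) with hp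
      simp only [List.foldl]
      have hget : PySem.List.pyGetD a (m : Int) 0 = zv a m := PySem.List.pyGetD_natCast a m 0
      by_cases hpos : 0 < zv a m
      · have hmz : (m : Int) + zv a m ≤ (n : Int) := hPre m (by omega) hm hpos
        set e0 : Nat := ((m : Int) + zv a m - 1).toNat with he0
        have he0n : e0 < n := by omega
        have he0c : ((e0 : Nat) : Int) = (m : Int) + zv a m - 1 := by omega
        have hstep : stepB1 a p (m : Int) = p.set e0 (max (p.getD e0 0) (zv a m)) := by
          simp only [stepB1, hget]
          rw [if_pos hpos]
        rw [hstep]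
        refine ⟨by simp [ihm.1], fun e he => ?_⟩
        rw [pvGetD_set _ _ _ _ (by omega)]
        rcases eq_or_ne e e0 with rfl | hne
        · have hcE : covE a m e0 = true := by
            rw [covE_iff]; exact ⟨hm, hpos, by omega⟩
          rw [if_pos rfl, G_succ, hcE, if_pos rfl, ihm.2 e0 he]
        · rw [if_neg hne, ihm.2 e he, G_succ_of_not a m e ?_]
          simp only [covE, decide_eq_false_iff_not]
          rintro ⟨-, -, habs⟩
          exact hne (by omega)
      · have hstep : stepB1 a p (m : Int) = p := by
          simp only [stepB1, hget]
          rw [if_neg hpos]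
        rw [hstep]
        refine ⟨ihm.1, fun e he => ?_⟩
        rw [ihm.2 e he, G_succ_of_not a m e ?_]
        simp only [covE, decide_eq_false_iff_not]
        rintro ⟨-, h1, -⟩
        omega

theorem Hd_last (a : List Int) (n q : Nat) (h : ¬ q + 1 < n) : Hd a n q = G a n q := by
  rw [Hd]; simp [h]

theorem Hd_step (a : List Int) (n q : Nat) (h : q + 1 < n) :
    Hd a n q = max (G a n q) (Hd a n (q+1) - 1) := by
  rw [Hd]; simp [h]

theorem pass2_inv (a : List Int) (n : Nat) :
    ∀ k : Nat, k ≤ n - 1 → ∀ p : List Int, p.length = n →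
    (∀ q, q < n → k ≤ q → p.getD q 0 = Hd a n q) →
    (∀ q, q < k → p.getD q 0 = G a n q) →
    ((PySem.List.pyRange (k : Int) 0 (-1)).foldl stepB2 p).length = n ∧
    ∀ q, q < n → ((PySem.List.pyRange (k : Int) 0 (-1)).foldl stepB2 p).getD q 0 = Hd a n q := by
  intro k
  induction k with
  | zero =>
    intro _ p hlen h1 h2
    rw [PySem.List.pyRange_neg_one_eq_nil (show ((0:Nat):Int) ≤ 0 by norm_num)]
    exact ⟨hlen, fun q hq => h1 q hq (Nat.zero_le q)⟩
  | succ k ih =>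
    intro hk p hlen h1 h2
    have hkn : k + 1 < n := by omega
    have hcons : PySem.List.pyRange ((k+1 : Nat) : Int) 0 (-1) =
        ((k+1 : Nat) : Int) :: PySem.List.pyRange (((k+1 : Nat) : Int) - 1) 0 (-1) :=
      PySem.List.pyRange_neg_one_cons (by positivity)
    have hcast : (((k+1 : Nat) : Int) - 1) = (k : Int) := by push_cast; ring
    rw [hcons, hcast, List.foldl_cons]
    have hidx1 : (((k+1 : Nat) : Int) - 1).toNat = k := by omega
    have hidx2 : (((k+1 : Nat) : Int)).toNat = k + 1 := by omega
    have hstep : stepB2 p ((k+1 : Nat) : Int) =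
        p.set k (max (p.getD k 0) (p.getD (k+1) 0 - 1)) := by
      simp only [stepB2, hidx1, hidx2]
    rw [hstep]
    have hk1 : p.getD (k+1) 0 = Hd a n (k+1) := h1 (k+1) hkn (le_refl _)
    have hk0 : p.getD k 0 = G a n k := h2 k (Nat.lt_succ_self k)
    refine ih (by omega) _ (by simpa using hlen) ?_ ?_
    · intro q hq hge
      rcases Nat.eq_or_lt_of_le hge with rfl | hgt
      · rw [pvGetD_set _ _ _ _ (by omega), if_pos rfl, hk0, hk1, ← Hd_step a n k hkn]
      · rw [pvGetD_set _ _ _ _ (by omega), if_neg (by omega)]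
        exact h1 q hq (by omega)
    · intro q hq
      rw [pvGetD_set _ _ _ _ (by omega), if_neg (by omega)]
      exact h2 q (by omega)

-- ---- the two characterisations agree ----
theorem cov_iff (a : List Int) (i q : Nat) :
    cov a i q = true ↔ 1 ≤ i ∧ 1 ≤ zv a i ∧ i ≤ q ∧ (q : Int) < (i : Int) + zv a i := by
  simp [cov]

theorem G_le_F (a : List Int) (n q : Nat) : G a n q ≤ F a n q := by
  refine G_le a n q _ (F_nonneg a n q) ?_
  intro i hi hc
  obtain ⟨h1, h2, h3⟩ := (covE_iff a i q).mp hc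
  have hcov : cov a i q = true := (cov_iff a i q).mpr ⟨h1, h2, by omega, by omega⟩
  have := F_ge a n q i hi hcov
  omega

theorem F_step_le (a : List Int) (n q : Nat) :
    F a n (q+1) ≤ F a n q + 1 := by
  have hF0 := F_nonneg a n q
  refine F_le a n (q+1) _ (by omega) ?_
  intro i hi hc
  obtain ⟨h1, h2, h3, h4⟩ := (cov_iff a i (q+1)).mp hc
  rcases Nat.lt_or_ge i (q+1) with hlt | hge
  · have hcov : cov a i q = true :=
      (cov_iff a i q).mpr ⟨h1, h2, by omega, by push_cast at h4 ⊢; omega⟩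
    have := F_ge a n q i hi hcov
    push_cast at this ⊢; omega
  · push_cast; omega

theorem F_le_max (a : List Int) (n q : Nat) :
    F a n q ≤ max (G a n q) (F a n (q+1) - 1) := by
  refine F_le a n q _ (le_trans (G_nonneg a n q) (le_max_left _ _)) ?_
  intro i hi hc
  obtain ⟨h1, h2, h3, h4⟩ := (cov_iff a i q).mp hc
  by_cases he : (i : Int) + zv a i = (q : Int) + 1
  · have hg := G_ge a n q i hi ((covE_iff a i q).mpr ⟨h1, h2, he⟩)
    exact le_trans (by omega) (le_max_left (G a n q) (F a n (q+1) - 1))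
  · have hcov : cov a i (q+1) = true :=
      (cov_iff a i (q+1)).mpr ⟨h1, h2, by omega, by push_cast; omega⟩
    have := F_ge a n (q+1) i hi hcov
    refine le_trans ?_ (le_max_right (G a n q) (F a n (q+1) - 1))
    push_cast at this ⊢; omega

theorem F_last_le_G (a : List Int) (n q : Nat) (hPre : PreN a n) (hq : q < n)
    (h : ¬ q + 1 < n) : F a n q ≤ G a n q := by
  refine F_le a n q _ (G_nonneg a n q) ?_
  intro i hi hc
  obtain ⟨h1, h2, h3, h4⟩ := (cov_iff a i q).mp hc
  have hle := hPre i hi h1 h2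
  have he : (i : Int) + zv a i = (q : Int) + 1 := by omega
  have := G_ge a n q i hi ((covE_iff a i q).mpr ⟨h1, h2, he⟩)
  omega

theorem Hd_eq_F (a : List Int) (n : Nat) (hPre : PreN a n) :
    ∀ q, q < n → Hd a n q = F a n q := by
  have main : ∀ d q, n - q = d → q < n → Hd a n q = F a n q := by
    intro d
    induction d with
    | zero => intro q h hq; omega
    | succ d ih =>
      intro q h hq
      by_cases hq1 : q + 1 < n
      · have hIH := ih (q+1) (by omega) hq1
        rw [Hd_step a n q hq1, hIH]
        apply le_antisymm
        · have h1 := G_le_F a n q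
          have h2 := F_step_le a n q
          exact max_le h1 (by omega)
        · exact F_le_max a n q
      · rw [Hd_last a n q hq1]
        exact le_antisymm (G_le_F a n q) (F_last_le_G a n q hPre hq hq1)
  exact fun q hq => main (n - q) q rfl hq

theorem pv_final (array : List Int) (length : Int) (hPre : Pre_z_to_prefix array length) :
    z_to_prefix array length = z_to_prefix_alt array length := by
  rw [z_to_prefix_eq, z_to_prefix_alt_eq]
  by_cases hlen : length ≤ 0
  · rw [PySem.List.pyRange_one_eq_nil (by omega),
      PySem.List.pyRange_neg_one_eq_nil (by omega)]
    rfl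
  · set n := length.toNat with hn
    have hcast : ((n : Nat) : Int) = length := by omega
    have hn1 : 1 ≤ n := by omega
    have hPreN : PreN array n := by
      intro i hi h1 h2
      have := hPre.2 i (by omega) h1 h2
      simp only [zv] at *
      omega
    rw [← hcast]
    have hA := outerA_inv array n hPreN n le_rfl
    have hB1 := pass1_inv array n hPreN n le_rfl
    have hGHd : ∀ q, q < n → n - 1 ≤ q →
        ((PySem.List.pyRange 1 (n : Int) 1).foldl (stepB1 array) (List.replicate n 0)).getD q 0
          = Hd array n q := by
      intro q hq hge
      have hq' : q = n - 1 := by omega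
      subst hq'
      rw [hB1.2 _ hq, ← Hd_last array n (n-1) (by omega)]
    have hB := pass2_inv array n (n - 1) le_rfl _ hB1.1 hGHd
      (fun q hq => hB1.2 q (by omega))
    have hcast2 : ((n : Nat) : Int) - 1 = (((n - 1 : Nat)) : Int) := by omega
    rw [hcast2]
    apply List.ext_getElem
    · rw [hA.1, hB.1]
    · intro q hq1 hq2
      have hqn : q < n := by rw [hA.1] at hq1; exact hq1
      have e1 := hA.2 q hqn
      have e2 := hB.2 q hqn
      rw [← List.getD_eq_getElem _ 0 hq1, ← List.getD_eq_getElem _ 0 hq2]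
      rw [e1, e2, Hd_eq_F array n hPreN q hqn]

theorem z_to_prefix_spec : Claim_equal_z_to_prefix := by
  intro array length _ hPre
  unfold Spec_z_to_prefix
  exact pv_final array length hPre
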